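-- pv_equiv track=rewrite | github.com/mirableio/chat-history | chat_history/services.py | _candidate_file_tokens
-- ===== SOURCE A (Python) =====
-- def _candidate_file_tokens(filename_stem: str) -> set[str]:
--     tokens = {filename_stem}
--     if filename_stem.startswith("file_") and "-" in filename_stem:
--         tokens.add(filename_stem.split("-", maxsplit=1)[0])
--     if filename_stem.startswith("file-"):
--         parts = filename_stem.split("-")
--         for index in range(2, len(parts) + 1):
--             tokens.add("-".join(parts[:index]))
--     return {token for token in tokens if token}
-- ===== SOURCE B (Python) =====
-- def _candidate_file_tokens(filename_stem: str) -> set[str]: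
--     out = [filename_stem]
--     if filename_stem.startswith("file_") and "-" in filename_stem:
--         out.append(filename_stem.split("-", maxsplit=1)[0])
--     if filename_stem.startswith("file-"):
--         parts = filename_stem.split("-")
--         prefix = parts[0]
--         for part in parts[1:]:
--             prefix += "-" + part
--             out.append(prefix)
--     return {token for token in out if token}
-- ===== Notes on version B (the rewrite author's own statement) =====
-- stated objective: simpler
-- what changed: Replaces the set-plus-range loop that re-slices and re-joins parts[:index] from scratch at every index with a plain list accumulator and a single running-prefix pass (prefix += '-' + part), deduplicating once at the end.
import Mathlib
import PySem

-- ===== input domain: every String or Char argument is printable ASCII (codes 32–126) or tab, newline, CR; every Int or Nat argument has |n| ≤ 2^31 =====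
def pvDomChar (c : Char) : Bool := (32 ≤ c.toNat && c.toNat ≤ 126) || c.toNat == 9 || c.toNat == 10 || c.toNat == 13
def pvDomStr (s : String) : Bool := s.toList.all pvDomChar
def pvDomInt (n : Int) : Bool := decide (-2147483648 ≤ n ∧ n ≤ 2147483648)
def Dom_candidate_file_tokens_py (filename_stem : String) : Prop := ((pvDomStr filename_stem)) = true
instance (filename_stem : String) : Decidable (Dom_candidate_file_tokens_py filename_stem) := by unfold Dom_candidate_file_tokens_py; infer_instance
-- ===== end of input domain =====

-- B replaces A's set-plus-range loop (re-joining parts[:index] from scratch at each index)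
-- with a plain list accumulator and one running-prefix pass, deduplicating once at the end.

-- ===== PORT A =====
def candidate_file_tokens_py (filename_stem : String) : List String :=
  let tokens : PySem.Set String := PySem.Set.ofList [filename_stem]
  let tokens :=
    if PySem.Str.startswith filename_stem "file_" && PySem.Str.isIn "-" filename_stem then
      PySem.Set.add tokens (((PySem.Str.splitMax? filename_stem "-" 1).getD []).headD "")
    else tokens
  let tokens :=
    if PySem.Str.startswith filename_stem "file-" then
      let parts := (PySem.Str.split? filename_stem "-").getD []
      (PySem.List.pyRange 2 ((parts.length : Int) + 1) 1).foldl
        (fun t i => PySem.Set.add t (PySem.Str.join "-" (PySem.List.slice parts none (some i)))) tokens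
    else tokens
  PySem.Set.ofList (tokens.filter (fun t => t != ""))

-- ===== PORT B =====
def candidate_file_tokens_py_alt (filename_stem : String) : List String :=
  let out : List String := [filename_stem]
  let out :=
    if PySem.Str.startswith filename_stem "file_" && PySem.Str.isIn "-" filename_stem then
      out ++ [((PySem.Str.splitMax? filename_stem "-" 1).getD []).headD ""]
    else out
  let out :=
    if PySem.Str.startswith filename_stem "file-" then
      let parts := (PySem.Str.split? filename_stem "-").getD []
      (parts.tail.foldl
        (fun (st : List String × String) part =>
          let pfx := String.ofList (st.2.toList ++ '-' :: part.toList)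
          (st.1 ++ [pfx], pfx))
        (out, parts.headD "")).1
    else out
  PySem.Set.ofList (out.filter (fun t => t != ""))

-- ===== PRECONDITION & SPEC =====
def Spec_candidate_file_tokens_py (filename_stem : String) (out : List String) : Prop := out = candidate_file_tokens_py_alt filename_stem
instance (filename_stem : String) (out : List String) : Decidable (Spec_candidate_file_tokens_py filename_stem out) := by unfold Spec_candidate_file_tokens_py; infer_instance

-- ===== CLAIM (what is proved, stated in full; the proofs are below) =====
def Claim_equal_candidate_file_tokens_py : Prop := ∀ (filename_stem : String), Dom_candidate_file_tokens_py filename_stem → Spec_candidate_file_tokens_py filename_stem (candidate_file_tokens_py filename_stem)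

-- ===== LEMMAS AND PROOFS =====

/-- The list of running prefixes B appends: starting from `pre`, each step glues `"-" ++ part`. -/
def pfxs (pre : String) : List String → List String
  | [] => []
  | p :: rest => String.ofList (pre.toList ++ '-' :: p.toList)
                   :: pfxs (String.ofList (pre.toList ++ '-' :: p.toList)) rest

/-- B's pair fold appends exactly `pfxs pre rest` to the accumulator list. -/
lemma pairFold_fst (rest : List String) : ∀ (out : List String) (pre : String),
    (rest.foldl
      (fun (st : List String × String) part =>
        (st.1 ++ [String.ofList (st.2.toList ++ '-' :: part.toList)],
          String.ofList (st.2.toList ++ '-' :: part.toList))) (out, pre)).1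
      = out ++ pfxs pre rest := by
  induction rest with
  | nil => intro out pre; simp [pfxs]
  | cons p rest ih =>
      intro out pre
      simp only [List.foldl_cons, pfxs]
      rw [ih]
      simp

lemma charsJoin (l : List (List Char)) : ∀ (p x : List Char),
    PySem.Chars.join ['-'] ((p :: l) ++ [x]) = PySem.Chars.join ['-'] (p :: l) ++ '-' :: x := by
  induction l with
  | nil =>
      intro p x
      simp [PySem.Chars.join_cons_cons, PySem.Chars.join_singleton]
  | cons q l ih =>
      intro p x
      have h := ih q x
      simp only [List.cons_append] at h ⊢
      rw [PySem.Chars.join_cons_cons, h, PySem.Chars.join_cons_cons]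
      simp

/-- Joining a nonempty list with one more element appends `"-" ++ x`. -/
lemma join_append_singleton (hd x : String) (xs : List String) :
    PySem.Str.join "-" ((hd :: xs) ++ [x])
      = String.ofList ((PySem.Str.join "-" (hd :: xs)).toList ++ '-' :: x.toList) := by
  apply String.toList_inj.mp
  have h : ("-" : String).toList = ['-'] := by decide
  simp only [PySem.Str.toList_join, String.toList_ofList, List.map_append, List.map_cons,
    List.map_nil, h]
  exact charsJoin (xs.map String.toList) hd.toList x.toList

lemma join_singleton_str (p : String) : PySem.Str.join "-" [p] = p := by
  apply String.toList_inj.mp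
  simp [PySem.Str.toList_join, PySem.Chars.join_singleton]

/-- A's range fold, generalized over how much of the list is already joined. -/
lemma rangeFold (rest : List String) : ∀ (hd : String) (done : List String) (t : PySem.Set String),
    (PySem.List.pyRange ((done.length : Int) + 2) ((done.length : Int) + 2 + (rest.length : Int)) 1).foldl
      (fun t i => PySem.Set.add t (PySem.Str.join "-" (PySem.List.slice (hd :: (done ++ rest)) none (some i)))) t
    = PySem.Set.update t (pfxs (PySem.Str.join "-" (hd :: done)) rest) := by
  induction rest with
  | nil =>
      intro hd done t
      simp [pfxs, PySem.Set.update_nil]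
  | cons r rest ih =>
      intro hd done t
      have hlt : (done.length : Int) + 2 < (done.length : Int) + 2 + ((r :: rest).length : Int) := by
        push_cast [List.length_cons]; omega
      rw [PySem.List.pyRange_one_cons hlt, List.foldl_cons]
      have hsl : PySem.List.slice (hd :: (done ++ r :: rest)) none (some ((done.length : Int) + 2))
          = (hd :: done) ++ [r] := by
        have hcast : (done.length : Int) + 2 = ((done.length + 2 : Nat) : Int) := by push_cast; ring
        rw [hcast, PySem.List.slice_to_natCast]
        have hsplit : hd :: (done ++ r :: rest) = ((hd :: done) ++ [r]) ++ rest := by simp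
        rw [hsplit]
        have hlen : done.length + 2 = ((hd :: done) ++ [r]).length := by simp
        rw [hlen, List.take_left]
      rw [hsl, join_append_singleton]
      have ih' := ih hd (done ++ [r])
        (PySem.Set.add t (String.ofList ((PySem.Str.join "-" (hd :: done)).toList ++ '-' :: r.toList)))
      have harg : hd :: ((done ++ [r]) ++ rest) = hd :: (done ++ r :: rest) := by simp
      rw [harg] at ih'
      rw [show ((done ++ [r]).length : Int) = (done.length : Int) + 1 from by simp] at ih'
      rw [show (done.length : Int) + 1 + 2 + (rest.length : Int)
            = (done.length : Int) + 2 + ((r :: rest).length : Int) from by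
          push_cast [List.length_cons]; omega] at ih'
      rw [show (done.length : Int) + 1 + 2 = (done.length : Int) + 2 + 1 from by omega] at ih'
      rw [ih']
      have hpfx : pfxs (PySem.Str.join "-" (hd :: done)) (r :: rest)
          = String.ofList ((PySem.Str.join "-" (hd :: done)).toList ++ '-' :: r.toList)
            :: pfxs (PySem.Str.join "-" (hd :: (done ++ [r]))) rest := by
        rw [pfxs]
        have : PySem.Str.join "-" (hd :: (done ++ [r]))
            = String.ofList ((PySem.Str.join "-" (hd :: done)).toList ++ '-' :: r.toList) := by
          rw [← join_append_singleton]; simp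
        rw [this]
      rw [hpfx, PySem.Set.update_cons]

/-- Dedup (the set comprehension over a list) commutes with filtering. -/
lemma ofList_filter {α : Type} [BEq α] [LawfulBEq α] (p : α → Bool) (xs : List α) :
    PySem.Set.ofList (xs.filter p) = (PySem.Set.ofList xs).filter p := by
  induction xs using List.reverseRecOn with
  | nil => simp [PySem.Set.ofList_nil]
  | append_singleton xs x ih =>
      have hadd : ∀ (s : PySem.Set α) (y : α),
          PySem.Set.add s y = if PySem.Set.contains s y then s else s ++ [y] := fun _ _ => rfl
      rw [List.filter_append, PySem.Set.ofList_append_singleton, hadd]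
      by_cases hp : p x = true
      · rw [show List.filter p [x] = [x] from by simp [hp],
          PySem.Set.ofList_append_singleton, ih, hadd]
        by_cases hx : x ∈ xs
        · rw [if_pos ((PySem.Set.contains_iff _ _).mpr
              (List.mem_filter.mpr ⟨(PySem.Set.mem_ofList xs x).mpr hx, hp⟩)),
            if_pos ((PySem.Set.contains_iff _ _).mpr ((PySem.Set.mem_ofList xs x).mpr hx))]
        · have h1 : PySem.Set.contains (PySem.Set.ofList xs) x = false := by
            rw [Bool.eq_false_iff]
            intro h
            exact hx ((PySem.Set.mem_ofList xs x).mp ((PySem.Set.contains_iff _ _).mp h))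
          have h2 : PySem.Set.contains (List.filter p (PySem.Set.ofList xs)) x = false := by
            rw [Bool.eq_false_iff]
            intro h
            exact hx ((PySem.Set.mem_ofList xs x).mp
              (List.mem_filter.mp ((PySem.Set.contains_iff _ _).mp h)).1)
          rw [if_neg (ne_true_of_eq_false h2), if_neg (ne_true_of_eq_false h1),
            List.filter_append]
          simp [hp]
      · have hfx : List.filter p [x] = [] := by
          simp only [Bool.not_eq_true] at hp; simp [hp]
        rw [hfx, List.append_nil, ih]
        by_cases hc : PySem.Set.contains (PySem.Set.ofList xs) x = true
        · rw [if_pos hc]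
        · rw [if_neg hc, List.filter_append, hfx, List.append_nil]

/-- Re-dedup of a filtered dedup collapses. -/
lemma final_step (X : List String) (q : String → Bool) :
    PySem.Set.ofList ((PySem.Set.ofList X).filter q) = PySem.Set.ofList (X.filter q) := by
  rw [← ofList_filter, PySem.Set.ofList_ofList]

-- ===== VERDICT (by name: the statement is the Claim_ definition above) =====
theorem candidate_file_tokens_py_spec : Claim_equal_candidate_file_tokens_py := by
  intro s _
  unfold Spec_candidate_file_tokens_py candidate_file_tokens_py candidate_file_tokens_py_alt
  simp only []
  set w := ((PySem.Str.splitMax? s "-" 1).getD []).headD "" with hw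
  set g1 := (PySem.Str.startswith s "file_" && PySem.Str.isIn "-" s) with hg1
  have hout1 : (if g1 = true then PySem.Set.add (PySem.Set.ofList [s]) w else PySem.Set.ofList [s])
      = PySem.Set.ofList (if g1 = true then [s] ++ [w] else [s]) := by
    cases g1
    · simp
    · simp [← PySem.Set.ofList_append_singleton]
  rw [hout1]
  set out1 := if g1 = true then [s] ++ [w] else [s] with hout1d
  by_cases hg2 : PySem.Str.startswith s "file-" = true
  · rw [if_pos hg2, if_pos hg2]
    generalize (PySem.Str.split? s "-").getD [] = parts
    cases parts with
    | nil => simp [final_step]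
    | cons p rest =>
        have hb : ((p :: rest).length : Int) + 1 = 2 + (rest.length : Int) := by
          push_cast [List.length_cons]; omega
        rw [hb]
        have hA := rangeFold rest p [] (PySem.Set.ofList out1)
        simp only [List.length_nil, Nat.cast_zero, zero_add, List.nil_append,
          join_singleton_str] at hA
        rw [hA, List.tail_cons, List.headD_cons, pairFold_fst, ← PySem.Set.ofList_append,
          final_step]
  · rw [if_neg hg2, if_neg hg2]
    rw [final_step]
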